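-- pv_equiv track=rewrite | github.com/OussamaAlyounes/Haptic_Handle | User_Study_Shape_Change/data_analysis.py | get_first_change
-- ===== SOURCE A (Python) =====
-- def get_first_change(array):
--     value_prev = None
--     for index,value in enumerate(array):
--         if value == 'r':
--             continue
--         if value != 'r' and value_prev!= None and value!=value_prev:
--             return index
--         value_prev = value
--     return -1
-- ===== SOURCE B (Python) =====
-- def get_first_change(array):
--     filtered = [(i, v) for i, v in enumerate(array) if v != 'r']
--     for (i1, v1), (i2, v2) in zip(filtered, filtered[1:]):
--         if v1 != v2:
--             return i2
--     return -1
-- ===== Notes on version B (the rewrite author's own statement) =====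
-- stated objective: alternative
-- what changed: Replaced the stateful single pass with prev-tracking by a filter of the non-'r' entries (with indices) followed by a pairwise scan of consecutive filtered pairs.
import Mathlib
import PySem

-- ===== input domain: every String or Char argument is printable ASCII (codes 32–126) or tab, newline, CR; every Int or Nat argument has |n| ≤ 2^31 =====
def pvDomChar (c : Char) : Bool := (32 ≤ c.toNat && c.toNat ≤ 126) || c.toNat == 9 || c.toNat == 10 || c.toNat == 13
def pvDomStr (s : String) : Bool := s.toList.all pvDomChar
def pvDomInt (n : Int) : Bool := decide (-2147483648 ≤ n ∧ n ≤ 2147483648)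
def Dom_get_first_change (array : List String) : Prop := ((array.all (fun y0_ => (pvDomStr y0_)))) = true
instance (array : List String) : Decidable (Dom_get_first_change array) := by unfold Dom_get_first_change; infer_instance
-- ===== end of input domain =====

-- B replaces A's stateful single pass (prev-tracking) by a filter of the non-'r'
-- entries followed by a pairwise scan of consecutive filtered pairs (alternative decomposition).


-- ===== PORT A =====
-- loop over enumerate(array) carrying value_prev : Option String
def get_first_change_go (l : List (Int × String)) (value_prev : Option String) : Int :=
  match l with
  | [] => -1
  | (index, value) :: rest =>
    if value = "r" then get_first_change_go rest value_prev
    else if value ≠ "r" ∧ value_prev ≠ none ∧ some value ≠ value_prev then index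
    else get_first_change_go rest (some value)

def get_first_change (array : List String) : Int :=
  get_first_change_go (PySem.List.enumerate array) none

-- ===== PORT B =====
-- scan over consecutive pairs of the filtered list (zip(filtered, filtered[1:]))
def get_first_change_alt_pairs (l : List (Int × String)) : Int :=
  match l with
  | (_, v1) :: (i2, v2) :: rest =>
    if v1 ≠ v2 then i2 else get_first_change_alt_pairs ((i2, v2) :: rest)
  | _ => -1

def get_first_change_alt (array : List String) : Int :=
  get_first_change_alt_pairs ((PySem.List.enumerate array).filter (fun p => p.2 ≠ "r"))

-- ===== PRECONDITION & SPEC =====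
def Spec_get_first_change (array : List String) (out : Int) : Prop := out = get_first_change_alt array
instance (array : List String) (out : Int) : Decidable (Spec_get_first_change array out) := by unfold Spec_get_first_change; infer_instance

-- ===== CLAIM (what is proved, stated in full; the proofs are below) =====
def Claim_equal_get_first_change : Prop := ∀ (array : List String), Dom_get_first_change array → Spec_get_first_change array (get_first_change array)

-- ===== LEMMAS AND PROOFS =====

-- A's loop with value_prev = some p behaves like B's pairwise scan on (j, p) prepended
-- to the filtered remainder (the prepended index j is never returned), and with
-- value_prev = none like B's scan on the filtered remainder itself.
theorem get_first_change_go_eq (l : List (Int × String)) :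
    (get_first_change_go l none
        = get_first_change_alt_pairs (l.filter (fun p => p.2 ≠ "r")))
    ∧ ∀ (j : Int) (p : String),
        get_first_change_go l (some p)
          = get_first_change_alt_pairs ((j, p) :: l.filter (fun q => q.2 ≠ "r")) := by
  induction l with
  | nil => simp [get_first_change_go, get_first_change_alt_pairs]
  | cons hd tl ih =>
    obtain ⟨i, v⟩ := hd
    by_cases hv : v = "r"
    · refine ⟨?_, fun j p => ?_⟩
      · simpa [get_first_change_go, hv, List.filter_cons] using ih.1
      · simpa [get_first_change_go, hv, List.filter_cons] using ih.2 j p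
    · constructor
      · simpa [get_first_change_go, hv, List.filter_cons] using ih.2 i v
      · intro j p
        by_cases hpv : v = p
        · subst hpv
          simpa [get_first_change_go, hv, get_first_change_alt_pairs, List.filter_cons]
            using ih.2 i v
        · simp [get_first_change_go, hv, hpv, get_first_change_alt_pairs,
            List.filter_cons, Ne.symm hpv]

-- ===== VERDICT (by name: the statement is the Claim_ definition above) =====
theorem get_first_change_spec : Claim_equal_get_first_change := by
  intro array _
  unfold Spec_get_first_change get_first_change get_first_change_alt
  exact (get_first_change_go_eq (PySem.List.enumerate array)).1
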